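-- pv_equiv track=rewrite | github.com/adamdoherty-arc/Magnus | src/nfl_team_database.py | get_all_teams_by_division
-- ===== SOURCE A (Python) =====
-- NFL_TEAMS = {
--     # AFC East
--     'Buffalo': {'abbr': 'buf', 'city': 'Buffalo', 'full_name': 'Buffalo Bills', 'division': 'AFC East'},
--     'Miami': {'abbr': 'mia', 'city': 'Miami', 'full_name': 'Miami Dolphins', 'division': 'AFC East'},
--     'New England': {'abbr': 'ne', 'city': 'New England', 'full_name': 'New England Patriots', 'division': 'AFC East'},
--     'New York Jets': {'abbr': 'nyj', 'city': 'New York', 'full_name': 'New York Jets', 'division': 'AFC East'},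
--
--     # AFC North
--     'Baltimore': {'abbr': 'bal', 'city': 'Baltimore', 'full_name': 'Baltimore Ravens', 'division': 'AFC North'},
--     'Cincinnati': {'abbr': 'cin', 'city': 'Cincinnati', 'full_name': 'Cincinnati Bengals', 'division': 'AFC North'},
--     'Cleveland': {'abbr': 'cle', 'city': 'Cleveland', 'full_name': 'Cleveland Browns', 'division': 'AFC North'},
--     'Pittsburgh': {'abbr': 'pit', 'city': 'Pittsburgh', 'full_name': 'Pittsburgh Steelers', 'division': 'AFC North'},
--
--     # AFC South
--     'Houston': {'abbr': 'hou', 'city': 'Houston', 'full_name': 'Houston Texans', 'division': 'AFC South'},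
--     'Indianapolis': {'abbr': 'ind', 'city': 'Indianapolis', 'full_name': 'Indianapolis Colts', 'division': 'AFC South'},
--     'Jacksonville': {'abbr': 'jax', 'city': 'Jacksonville', 'full_name': 'Jacksonville Jaguars', 'division': 'AFC South'},
--     'Tennessee': {'abbr': 'ten', 'city': 'Tennessee', 'full_name': 'Tennessee Titans', 'division': 'AFC South'},
--
--     # AFC West
--     'Denver': {'abbr': 'den', 'city': 'Denver', 'full_name': 'Denver Broncos', 'division': 'AFC West'},
--     'Kansas City': {'abbr': 'kc', 'city': 'Kansas City', 'full_name': 'Kansas City Chiefs', 'division': 'AFC West'},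
--     'Las Vegas': {'abbr': 'lv', 'city': 'Las Vegas', 'full_name': 'Las Vegas Raiders', 'division': 'AFC West'},
--     'Los Angeles Chargers': {'abbr': 'lac', 'city': 'Los Angeles', 'full_name': 'Los Angeles Chargers', 'division': 'AFC West'},
--
--     # NFC East
--     'Dallas': {'abbr': 'dal', 'city': 'Dallas', 'full_name': 'Dallas Cowboys', 'division': 'NFC East'},
--     'New York Giants': {'abbr': 'nyg', 'city': 'New York', 'full_name': 'New York Giants', 'division': 'NFC East'},
--     'Philadelphia': {'abbr': 'phi', 'city': 'Philadelphia', 'full_name': 'Philadelphia Eagles', 'division': 'NFC East'},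
--     'Washington': {'abbr': 'wsh', 'city': 'Washington', 'full_name': 'Washington Commanders', 'division': 'NFC East'},
--
--     # NFC North
--     'Chicago': {'abbr': 'chi', 'city': 'Chicago', 'full_name': 'Chicago Bears', 'division': 'NFC North'},
--     'Detroit': {'abbr': 'det', 'city': 'Detroit', 'full_name': 'Detroit Lions', 'division': 'NFC North'},
--     'Green Bay': {'abbr': 'gb', 'city': 'Green Bay', 'full_name': 'Green Bay Packers', 'division': 'NFC North'},
--     'Minnesota': {'abbr': 'min', 'city': 'Minnesota', 'full_name': 'Minnesota Vikings', 'division': 'NFC North'},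
--
--     # NFC South
--     'Atlanta': {'abbr': 'atl', 'city': 'Atlanta', 'full_name': 'Atlanta Falcons', 'division': 'NFC South'},
--     'Carolina': {'abbr': 'car', 'city': 'Carolina', 'full_name': 'Carolina Panthers', 'division': 'NFC South'},
--     'New Orleans': {'abbr': 'no', 'city': 'New Orleans', 'full_name': 'New Orleans Saints', 'division': 'NFC South'},
--     'Tampa Bay': {'abbr': 'tb', 'city': 'Tampa Bay', 'full_name': 'Tampa Bay Buccaneers', 'division': 'NFC South'},
--
--     # NFC West
--     'Arizona': {'abbr': 'ari', 'city': 'Arizona', 'full_name': 'Arizona Cardinals', 'division': 'NFC West'},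
--     'Los Angeles Rams': {'abbr': 'lar', 'city': 'Los Angeles', 'full_name': 'Los Angeles Rams', 'division': 'NFC West'},
--     'San Francisco': {'abbr': 'sf', 'city': 'San Francisco', 'full_name': 'San Francisco 49ers', 'division': 'NFC West'},
--     'Seattle': {'abbr': 'sea', 'city': 'Seattle', 'full_name': 'Seattle Seahawks', 'division': 'NFC West'},
-- }
--
-- def get_all_teams_by_division(division: str = None) -> dict:
--     """
--     Get teams filtered by division
--
--     Args:
--         division: Division name (e.g., "AFC East", "NFC North") or None for all teams
--
--     Returns:
--         dict: Filtered teams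
--     """
--     if division is None:
--         return NFL_TEAMS
--
--     return {
--         name: info
--         for name, info in NFL_TEAMS.items()
--         if info['division'] == division
--     }
-- ===== SOURCE B (Python) =====
-- # Division-grouped roster with factored fields: full_name = city + ' ' + mascot,
-- # division comes from the group header, so neither is stored per team.
-- DIVISION_ROSTER = [
--     ("AFC East", [("Buffalo", "buf", "Buffalo", "Bills"),
--                   ("Miami", "mia", "Miami", "Dolphins"),
--                   ("New England", "ne", "New England", "Patriots"),
--                   ("New York Jets", "nyj", "New York", "Jets")]),
--     ("AFC North", [("Baltimore", "bal", "Baltimore", "Ravens"),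
--                    ("Cincinnati", "cin", "Cincinnati", "Bengals"),
--                    ("Cleveland", "cle", "Cleveland", "Browns"),
--                    ("Pittsburgh", "pit", "Pittsburgh", "Steelers")]),
--     ("AFC South", [("Houston", "hou", "Houston", "Texans"),
--                    ("Indianapolis", "ind", "Indianapolis", "Colts"),
--                    ("Jacksonville", "jax", "Jacksonville", "Jaguars"),
--                    ("Tennessee", "ten", "Tennessee", "Titans")]),
--     ("AFC West", [("Denver", "den", "Denver", "Broncos"),
--                   ("Kansas City", "kc", "Kansas City", "Chiefs"),
--                   ("Las Vegas", "lv", "Las Vegas", "Raiders"),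
--                   ("Los Angeles Chargers", "lac", "Los Angeles", "Chargers")]),
--     ("NFC East", [("Dallas", "dal", "Dallas", "Cowboys"),
--                   ("New York Giants", "nyg", "New York", "Giants"),
--                   ("Philadelphia", "phi", "Philadelphia", "Eagles"),
--                   ("Washington", "wsh", "Washington", "Commanders")]),
--     ("NFC North", [("Chicago", "chi", "Chicago", "Bears"),
--                    ("Detroit", "det", "Detroit", "Lions"),
--                    ("Green Bay", "gb", "Green Bay", "Packers"),
--                    ("Minnesota", "min", "Minnesota", "Vikings")]),
--     ("NFC South", [("Atlanta", "atl", "Atlanta", "Falcons"),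
--                    ("Carolina", "car", "Carolina", "Panthers"),
--                    ("New Orleans", "no", "New Orleans", "Saints"),
--                    ("Tampa Bay", "tb", "Tampa Bay", "Buccaneers")]),
--     ("NFC West", [("Arizona", "ari", "Arizona", "Cardinals"),
--                   ("Los Angeles Rams", "lar", "Los Angeles", "Rams"),
--                   ("San Francisco", "sf", "San Francisco", "49ers"),
--                   ("Seattle", "sea", "Seattle", "Seahawks")]),
-- ]
--
--
-- def _info(div, team):
--     name, abbr, city, mascot = team
--     return {'abbr': abbr, 'city': city,
--             'full_name': city + ' ' + mascot, 'division': div}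
--
--
-- def get_all_teams_by_division(division: str = None) -> dict:
--     if division is None:
--         return {t[0]: _info(dv, t) for dv, teams in DIVISION_ROSTER for t in teams}
--     for dv, teams in DIVISION_ROSTER:
--         if dv == division:
--             return {t[0]: _info(dv, t) for t in teams}
--     return {}
-- ===== Notes on version B (the rewrite author's own statement) =====
-- stated objective: alternative
-- what changed: B replaces the flat name->info table and per-call scan-and-filter with a division-grouped roster of factored (name, abbr, city, mascot) tuples: it linearly searches the 8 group headers for the requested division and materializes the info dicts (full_name = city + ' ' + mascot, division from the group header) only for that group; None flattens all groups.
import Mathlib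
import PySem

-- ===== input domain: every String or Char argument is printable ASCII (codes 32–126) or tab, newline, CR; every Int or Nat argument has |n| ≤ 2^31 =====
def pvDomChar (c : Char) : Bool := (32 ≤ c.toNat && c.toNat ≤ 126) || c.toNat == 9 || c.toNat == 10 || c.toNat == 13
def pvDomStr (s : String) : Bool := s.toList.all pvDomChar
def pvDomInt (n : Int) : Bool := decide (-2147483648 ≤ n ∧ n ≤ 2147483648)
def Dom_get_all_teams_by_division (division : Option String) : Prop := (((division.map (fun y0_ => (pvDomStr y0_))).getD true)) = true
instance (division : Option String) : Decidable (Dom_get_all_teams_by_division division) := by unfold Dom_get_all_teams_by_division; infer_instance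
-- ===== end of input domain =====

-- B replaces A's flat name→info table and per-call scan-and-filter with a division-grouped
-- roster of factored (name, abbr, city, mascot) tuples searched by group header (objective: alternative).


-- ===== PORT A =====
def NFL_TEAMS : List (String × List (String × String)) := [
  ("Buffalo", [("abbr", "buf"), ("city", "Buffalo"), ("full_name", "Buffalo Bills"), ("division", "AFC East")]),
  ("Miami", [("abbr", "mia"), ("city", "Miami"), ("full_name", "Miami Dolphins"), ("division", "AFC East")]),
  ("New England", [("abbr", "ne"), ("city", "New England"), ("full_name", "New England Patriots"), ("division", "AFC East")]),
  ("New York Jets", [("abbr", "nyj"), ("city", "New York"), ("full_name", "New York Jets"), ("division", "AFC East")]),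
  ("Baltimore", [("abbr", "bal"), ("city", "Baltimore"), ("full_name", "Baltimore Ravens"), ("division", "AFC North")]),
  ("Cincinnati", [("abbr", "cin"), ("city", "Cincinnati"), ("full_name", "Cincinnati Bengals"), ("division", "AFC North")]),
  ("Cleveland", [("abbr", "cle"), ("city", "Cleveland"), ("full_name", "Cleveland Browns"), ("division", "AFC North")]),
  ("Pittsburgh", [("abbr", "pit"), ("city", "Pittsburgh"), ("full_name", "Pittsburgh Steelers"), ("division", "AFC North")]),
  ("Houston", [("abbr", "hou"), ("city", "Houston"), ("full_name", "Houston Texans"), ("division", "AFC South")]),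
  ("Indianapolis", [("abbr", "ind"), ("city", "Indianapolis"), ("full_name", "Indianapolis Colts"), ("division", "AFC South")]),
  ("Jacksonville", [("abbr", "jax"), ("city", "Jacksonville"), ("full_name", "Jacksonville Jaguars"), ("division", "AFC South")]),
  ("Tennessee", [("abbr", "ten"), ("city", "Tennessee"), ("full_name", "Tennessee Titans"), ("division", "AFC South")]),
  ("Denver", [("abbr", "den"), ("city", "Denver"), ("full_name", "Denver Broncos"), ("division", "AFC West")]),
  ("Kansas City", [("abbr", "kc"), ("city", "Kansas City"), ("full_name", "Kansas City Chiefs"), ("division", "AFC West")]),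
  ("Las Vegas", [("abbr", "lv"), ("city", "Las Vegas"), ("full_name", "Las Vegas Raiders"), ("division", "AFC West")]),
  ("Los Angeles Chargers", [("abbr", "lac"), ("city", "Los Angeles"), ("full_name", "Los Angeles Chargers"), ("division", "AFC West")]),
  ("Dallas", [("abbr", "dal"), ("city", "Dallas"), ("full_name", "Dallas Cowboys"), ("division", "NFC East")]),
  ("New York Giants", [("abbr", "nyg"), ("city", "New York"), ("full_name", "New York Giants"), ("division", "NFC East")]),
  ("Philadelphia", [("abbr", "phi"), ("city", "Philadelphia"), ("full_name", "Philadelphia Eagles"), ("division", "NFC East")]),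
  ("Washington", [("abbr", "wsh"), ("city", "Washington"), ("full_name", "Washington Commanders"), ("division", "NFC East")]),
  ("Chicago", [("abbr", "chi"), ("city", "Chicago"), ("full_name", "Chicago Bears"), ("division", "NFC North")]),
  ("Detroit", [("abbr", "det"), ("city", "Detroit"), ("full_name", "Detroit Lions"), ("division", "NFC North")]),
  ("Green Bay", [("abbr", "gb"), ("city", "Green Bay"), ("full_name", "Green Bay Packers"), ("division", "NFC North")]),
  ("Minnesota", [("abbr", "min"), ("city", "Minnesota"), ("full_name", "Minnesota Vikings"), ("division", "NFC North")]),
  ("Atlanta", [("abbr", "atl"), ("city", "Atlanta"), ("full_name", "Atlanta Falcons"), ("division", "NFC South")]),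
  ("Carolina", [("abbr", "car"), ("city", "Carolina"), ("full_name", "Carolina Panthers"), ("division", "NFC South")]),
  ("New Orleans", [("abbr", "no"), ("city", "New Orleans"), ("full_name", "New Orleans Saints"), ("division", "NFC South")]),
  ("Tampa Bay", [("abbr", "tb"), ("city", "Tampa Bay"), ("full_name", "Tampa Bay Buccaneers"), ("division", "NFC South")]),
  ("Arizona", [("abbr", "ari"), ("city", "Arizona"), ("full_name", "Arizona Cardinals"), ("division", "NFC West")]),
  ("Los Angeles Rams", [("abbr", "lar"), ("city", "Los Angeles"), ("full_name", "Los Angeles Rams"), ("division", "NFC West")]),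
  ("San Francisco", [("abbr", "sf"), ("city", "San Francisco"), ("full_name", "San Francisco 49ers"), ("division", "NFC West")]),
  ("Seattle", [("abbr", "sea"), ("city", "Seattle"), ("full_name", "Seattle Seahawks"), ("division", "NFC West")])
]

def get_all_teams_by_division (division : Option String) : List (String × List (String × String)) :=
  match division with
  | none => NFL_TEAMS
  | some d =>
    -- dict comprehension over NFL_TEAMS.items() with the division filter;
    -- info['division'] ported as get? + getD: the key is present in every entry of the fixed table
    (NFL_TEAMS.foldl
      (fun acc p => if (((PySem.Dict.mk p.2).get? "division").getD "") == d then acc.insert p.1 p.2 else acc)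
      PySem.Dict.empty).items

-- ===== PORT B =====
-- grouped roster: (division, [(name, abbr, city, mascot), …]); full_name and division are not stored
def DIVISION_ROSTER : List (String × List (String × String × String × String)) := [
  ("AFC East", [("Buffalo", "buf", "Buffalo", "Bills"),
                ("Miami", "mia", "Miami", "Dolphins"),
                ("New England", "ne", "New England", "Patriots"),
                ("New York Jets", "nyj", "New York", "Jets")]),
  ("AFC North", [("Baltimore", "bal", "Baltimore", "Ravens"),
                 ("Cincinnati", "cin", "Cincinnati", "Bengals"),
                 ("Cleveland", "cle", "Cleveland", "Browns"),
                 ("Pittsburgh", "pit", "Pittsburgh", "Steelers")]),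
  ("AFC South", [("Houston", "hou", "Houston", "Texans"),
                 ("Indianapolis", "ind", "Indianapolis", "Colts"),
                 ("Jacksonville", "jax", "Jacksonville", "Jaguars"),
                 ("Tennessee", "ten", "Tennessee", "Titans")]),
  ("AFC West", [("Denver", "den", "Denver", "Broncos"),
                ("Kansas City", "kc", "Kansas City", "Chiefs"),
                ("Las Vegas", "lv", "Las Vegas", "Raiders"),
                ("Los Angeles Chargers", "lac", "Los Angeles", "Chargers")]),
  ("NFC East", [("Dallas", "dal", "Dallas", "Cowboys"),
                ("New York Giants", "nyg", "New York", "Giants"),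
                ("Philadelphia", "phi", "Philadelphia", "Eagles"),
                ("Washington", "wsh", "Washington", "Commanders")]),
  ("NFC North", [("Chicago", "chi", "Chicago", "Bears"),
                 ("Detroit", "det", "Detroit", "Lions"),
                 ("Green Bay", "gb", "Green Bay", "Packers"),
                 ("Minnesota", "min", "Minnesota", "Vikings")]),
  ("NFC South", [("Atlanta", "atl", "Atlanta", "Falcons"),
                 ("Carolina", "car", "Carolina", "Panthers"),
                 ("New Orleans", "no", "New Orleans", "Saints"),
                 ("Tampa Bay", "tb", "Tampa Bay", "Buccaneers")]),
  ("NFC West", [("Arizona", "ari", "Arizona", "Cardinals"),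
                ("Los Angeles Rams", "lar", "Los Angeles", "Rams"),
                ("San Francisco", "sf", "San Francisco", "49ers"),
                ("Seattle", "sea", "Seattle", "Seahawks")])
]

-- _info(div, team): city + ' ' + mascot ported via PySem.Str.join '' (exact for Python str +)
def infoOf (dv : String) (t : String × String × String × String) : List (String × String) :=
  [("abbr", t.2.1), ("city", t.2.2.1),
   ("full_name", PySem.Str.join "" [t.2.2.1, " ", t.2.2.2]), ("division", dv)]

-- the dict comprehension {t[0]: _info(dv, t) for t in teams}
def groupDict (dv : String) (teams : List (String × String × String × String)) : List (String × List (String × String)) :=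
  (teams.foldl (fun acc t => acc.insert t.1 (infoOf dv t)) PySem.Dict.empty).items

-- 'for dv, teams in DIVISION_ROSTER: if dv == division: return …' / final 'return {}'
def findGroup (gs : List (String × List (String × String × String × String))) (d : String) :
    List (String × List (String × String)) :=
  match gs with
  | [] => []
  | g :: rest => if g.1 == d then groupDict g.1 g.2 else findGroup rest d

def get_all_teams_by_division_alt (division : Option String) : List (String × List (String × String)) :=
  match division with
  | none =>
    -- nested dict comprehension over all groups
    (DIVISION_ROSTER.foldl
      (fun acc g => g.2.foldl (fun acc2 t => acc2.insert t.1 (infoOf g.1 t)) acc)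
      PySem.Dict.empty).items
  | some d => findGroup DIVISION_ROSTER d

-- ===== PRECONDITION & SPEC =====
def Spec_get_all_teams_by_division (division : Option String) (out : List (String × List (String × String))) : Prop := out = get_all_teams_by_division_alt division
instance (division : Option String) (out : List (String × List (String × String))) : Decidable (Spec_get_all_teams_by_division division out) := by unfold Spec_get_all_teams_by_division; infer_instance

-- ===== CLAIM (what is proved, stated in full; the proofs are below) =====
def Claim_equal_get_all_teams_by_division : Prop := ∀ (division : Option String), Dom_get_all_teams_by_division division → Spec_get_all_teams_by_division division (get_all_teams_by_division division)

-- ===== LEMMAS AND PROOFS =====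

def ALL_DIVISIONS : List String :=
  ["AFC East", "AFC North", "AFC South", "AFC West",
   "NFC East", "NFC North", "NFC South", "NFC West"]

set_option maxRecDepth 8192 in
lemma none_case : get_all_teams_by_division none = get_all_teams_by_division_alt none := by
  decide

lemma known_division_case (d : String) (h : d ∈ ALL_DIVISIONS) :
    get_all_teams_by_division (some d) = get_all_teams_by_division_alt (some d) := by
  fin_cases h <;> decide

set_option maxRecDepth 8192 in
lemma unknown_division_case (d : String) (h : d ∉ ALL_DIVISIONS) :
    get_all_teams_by_division (some d) = get_all_teams_by_division_alt (some d) := by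
  simp only [ALL_DIVISIONS, List.mem_cons, List.not_mem_nil, or_false, not_or] at h
  obtain ⟨h1, h2, h3, h4, h5, h6, h7, h8⟩ := h
  simp [get_all_teams_by_division, get_all_teams_by_division_alt, NFL_TEAMS,
    DIVISION_ROSTER, findGroup, PySem.Dict.empty,
    PySem.Dict.get?_mk_cons,
    Ne.symm h1, Ne.symm h2, Ne.symm h3, Ne.symm h4,
    Ne.symm h5, Ne.symm h6, Ne.symm h7, Ne.symm h8]

-- ===== VERDICT (by name: the statement is the Claim_ definition above) =====
theorem get_all_teams_by_division_spec : Claim_equal_get_all_teams_by_division := by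
  intro division _
  unfold Spec_get_all_teams_by_division
  match division with
  | none => exact none_case
  | some d =>
    by_cases h : d ∈ ALL_DIVISIONS
    · exact known_division_case d h
    · exact unknown_division_case d h
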